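-- pv_equiv track=rewrite | github.com/Ukeme-Edet/CodeForces | 1833c_vbba.py | build_even
-- ===== SOURCE A (Python) =====
-- def build_even(a, n):
--     temp = 0
--     even_hash = {"op": [], "on": [], "en": []}
--     for i in range(n):
--         if a[i] % 2 != 0 or a[i] < 1:
--             if a[i] % 2 == 1 and a[i] > 0:
--                 even_hash["op"].append(a[i])
--             elif a[i] % 2 == 0 and a[i] < 1:
--                 even_hash["en"].append(a[i])
--             else:
--                 even_hash["on"].append(a[i])
--     for i in range(n):
--         if a[i] % 2 != 0 or a[i] < 1:
--             if a[i] % 2 == 1 and a[i] > 0: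
--                 opon = even_hash["op"] + even_hash["on"]
--                 for hash in opon:
--                     temp = a[i] - hash
--                     if temp < 1:
--                         continue
--                     if temp % 2 == 0:
--                         break
--                 if temp % 2 != 0 or temp < 1:
--                     return False
--             elif a[i] % 2 == 0 and a[i] < 1:
--                 for hash in even_hash["en"]:
--                     temp = a[i] - hash
--                     if temp < 1:
--                         continue
--                     if temp % 2 == 0:
--                         break
--                 if temp % 2 != 0 or temp < 1:
--                     return False
--             else:
--                 for hash in even_hash["on"]:
--                     temp = a[i] - hash
--                     if temp < 1:
--                         continue
--                     if temp % 2 == 0: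
--                         break
--                 if temp % 2 != 0 or temp < 1:
--                     return False
--     return True
-- ===== SOURCE B (Python) =====
-- def build_even(a, n):
--     xs = a[:n] if n > 0 else []
--     min_odd = min((x for x in xs if x % 2 != 0), default=None)
--     min_odd_np = min((x for x in xs if x % 2 != 0 and x < 1), default=None)
--     min_even_np = min((x for x in xs if x % 2 == 0 and x < 1), default=None)
--     for x in xs:
--         if x % 2 != 0:
--             m = min_odd if x > 0 else min_odd_np
--         elif x < 1:
--             m = min_even_np
--         else:
--             continue
--         if m is None or m >= x:
--             return False
--     return True
-- ===== Notes on version B (the rewrite author's own statement) =====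
-- stated objective: faster
-- what changed: A rescans the parity buckets linearly for every odd/nonpositive element (and threads a leftover temp variable); B computes the three bucket minima once in a single pass and tests each element against the right minimum by a threshold comparison.
import Mathlib
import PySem

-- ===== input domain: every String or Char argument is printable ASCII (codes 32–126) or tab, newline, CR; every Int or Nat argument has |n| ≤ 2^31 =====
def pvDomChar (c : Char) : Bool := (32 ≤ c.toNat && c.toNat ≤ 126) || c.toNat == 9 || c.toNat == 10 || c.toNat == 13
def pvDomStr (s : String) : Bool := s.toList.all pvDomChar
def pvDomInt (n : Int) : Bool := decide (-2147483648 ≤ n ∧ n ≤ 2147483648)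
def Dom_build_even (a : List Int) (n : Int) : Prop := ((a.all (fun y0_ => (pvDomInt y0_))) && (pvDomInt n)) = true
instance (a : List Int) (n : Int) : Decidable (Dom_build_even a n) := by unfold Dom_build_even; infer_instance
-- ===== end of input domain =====

-- B replaces A's per-element linear scans of the parity buckets by three bucket minima
-- computed once, testing each element against the right minimum (objective: faster).

-- ===== PORT A =====
-- first loop body: sort a[i] into the buckets op / on / en
def pvFill (a : List Int) (st : List Int × List Int × List Int) (i : Int) :
    List Int × List Int × List Int :=
  let x := PySem.List.pyGetD a i 0
  if PySem.Int.mod x 2 ≠ 0 ∨ x < 1 then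
    if PySem.Int.mod x 2 = 1 ∧ x > 0 then (st.1 ++ [x], st.2.1, st.2.2)
    else if PySem.Int.mod x 2 = 0 ∧ x < 1 then (st.1, st.2.1, st.2.2 ++ [x])
    else (st.1, st.2.1 ++ [x], st.2.2)
  else st

-- inner 'for hash in …' loop: temp = a[i] - hash; continue if temp < 1; break if temp even
def pvScan (x : Int) : Int → List Int → Int
  | temp, [] => temp
  | _, h :: t =>
    let temp' := x - h
    if temp' < 1 then pvScan x temp' t
    else if PySem.Int.mod temp' 2 = 0 then temp'
    else pvScan x temp' t

-- second loop over the indices, threading the persistent temp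
def pvLoop2 (a : List Int) (op onl en : List Int) : Int → List Int → Bool
  | _, [] => true
  | temp, i :: rest =>
    let x := PySem.List.pyGetD a i 0
    if PySem.Int.mod x 2 ≠ 0 ∨ x < 1 then
      if PySem.Int.mod x 2 = 1 ∧ x > 0 then
        let t' := pvScan x temp (op ++ onl)
        if PySem.Int.mod t' 2 ≠ 0 ∨ t' < 1 then false else pvLoop2 a op onl en t' rest
      else if PySem.Int.mod x 2 = 0 ∧ x < 1 then
        let t' := pvScan x temp en
        if PySem.Int.mod t' 2 ≠ 0 ∨ t' < 1 then false else pvLoop2 a op onl en t' rest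
      else
        let t' := pvScan x temp onl
        if PySem.Int.mod t' 2 ≠ 0 ∨ t' < 1 then false else pvLoop2 a op onl en t' rest
    else pvLoop2 a op onl en temp rest

def build_even (a : List Int) (n : Int) : Bool :=
  let idxs := PySem.List.pyRange 0 n 1
  let st := idxs.foldl (pvFill a) ([], [], [])
  pvLoop2 a st.1 st.2.1 st.2.2 0 idxs

-- ===== PORT B =====
-- per-element check against the precomputed bucket minimum
def pvCheck (minOdd minOddNp minEvenNp : Option Int) (x : Int) : Bool :=
  if PySem.Int.mod x 2 ≠ 0 then
    match (if x > 0 then minOdd else minOddNp) with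
    | none => false
    | some m => decide (m < x)
  else if x < 1 then
    match minEvenNp with
    | none => false
    | some m => decide (m < x)
  else true

def build_even_alt (a : List Int) (n : Int) : Bool :=
  let xs := if n > 0 then PySem.List.slice a none (some n) else []
  let minOdd := PySem.List.min? (xs.filter fun x => decide (PySem.Int.mod x 2 ≠ 0)) (fun y => y)
  let minOddNp := PySem.List.min? (xs.filter fun x => decide (PySem.Int.mod x 2 ≠ 0 ∧ x ≤ 0)) (fun y => y)
  let minEvenNp := PySem.List.min? (xs.filter fun x => decide (PySem.Int.mod x 2 = 0 ∧ x < 1)) (fun y => y)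
  xs.all (pvCheck minOdd minOddNp minEvenNp)

-- ===== PRECONDITION & SPEC =====
-- A indexes a[0..n-1]; it raises IndexError exactly when n > len(a) (negative n is fine: range(n) is empty)
def Pre_build_even (a : List Int) (n : Int) : Prop := n ≤ (a.length : Int)
instance (a : List Int) (n : Int) : Decidable (Pre_build_even a n) := by unfold Pre_build_even; infer_instance
def pvWitness_build_even : List Int × Int := ([3, 1, 2], 3)

def Spec_build_even (a : List Int) (n : Int) (out : Bool) : Prop := out = build_even_alt a n
instance (a : List Int) (n : Int) (out : Bool) : Decidable (Spec_build_even a n out) := by unfold Spec_build_even; infer_instance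

-- ===== CLAIM (what is proved, stated in full; the proofs are below) =====
def Claim_equal_build_even : Prop := ∀ (a : List Int) (n : Int), Dom_build_even a n → Pre_build_even a n → Spec_build_even a n (build_even a n)

-- ===== LEMMAS AND PROOFS =====

theorem pvMod2 (x : Int) : PySem.Int.mod x 2 = x % 2 :=
  PySem.Int.mod_eq_emod_of_pos (by norm_num)

-- bucket predicates (what the first loop's branches amount to)
def pOp (x : Int) : Bool := decide (x % 2 = 1 ∧ x > 0)
def pOn (x : Int) : Bool := decide (x % 2 = 1 ∧ x ≤ 0)
def pEn (x : Int) : Bool := decide (x % 2 = 0 ∧ x < 1)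

-- element-level twins of A's loops
def pvFillE (st : List Int × List Int × List Int) (x : Int) :
    List Int × List Int × List Int :=
  if PySem.Int.mod x 2 ≠ 0 ∨ x < 1 then
    if PySem.Int.mod x 2 = 1 ∧ x > 0 then (st.1 ++ [x], st.2.1, st.2.2)
    else if PySem.Int.mod x 2 = 0 ∧ x < 1 then (st.1, st.2.1, st.2.2 ++ [x])
    else (st.1, st.2.1 ++ [x], st.2.2)
  else st

def pvLoop2E (op onl en : List Int) : Int → List Int → Bool
  | _, [] => true
  | temp, x :: rest =>
    if PySem.Int.mod x 2 ≠ 0 ∨ x < 1 then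
      if PySem.Int.mod x 2 = 1 ∧ x > 0 then
        let t' := pvScan x temp (op ++ onl)
        if PySem.Int.mod t' 2 ≠ 0 ∨ t' < 1 then false else pvLoop2E op onl en t' rest
      else if PySem.Int.mod x 2 = 0 ∧ x < 1 then
        let t' := pvScan x temp en
        if PySem.Int.mod t' 2 ≠ 0 ∨ t' < 1 then false else pvLoop2E op onl en t' rest
      else
        let t' := pvScan x temp onl
        if PySem.Int.mod t' 2 ≠ 0 ∨ t' < 1 then false else pvLoop2E op onl en t' rest
    else pvLoop2E op onl en temp rest

-- the common specification of one element's test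
def pvGood (xs : List Int) (x : Int) : Bool :=
  if x % 2 ≠ 0 then xs.any (fun y => decide (y % 2 ≠ 0 ∧ y < x))
  else if x < 1 then xs.any (fun y => decide (y % 2 = 0 ∧ y < x))
  else true

theorem pvFold_fill_map (a : List Int) (idxs : List Int) (st : List Int × List Int × List Int) :
    idxs.foldl (pvFill a) st = (idxs.map (fun i => PySem.List.pyGetD a i 0)).foldl pvFillE st := by
  induction idxs generalizing st with
  | nil => rfl
  | cons i t ih => simp only [List.foldl_cons, List.map_cons, ih]; rfl

theorem pvLoop2_map (a : List Int) (op onl en : List Int) (temp : Int) (idxs : List Int) :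
    pvLoop2 a op onl en temp idxs =
      pvLoop2E op onl en temp (idxs.map (fun i => PySem.List.pyGetD a i 0)) := by
  induction idxs generalizing temp with
  | nil => rfl
  | cons i t ih =>
    simp only [pvLoop2, pvLoop2E, List.map_cons]
    split_ifs <;> simp [ih]

theorem pvFillE_step (st : List Int × List Int × List Int) (x : Int) :
    pvFillE st x = (st.1 ++ (if pOp x then [x] else []),
                    st.2.1 ++ (if pOn x then [x] else []),
                    st.2.2 ++ (if pEn x then [x] else [])) := by
  have h2 := Int.emod_two_eq x
  simp only [pvFillE, pvMod2, pOp, pOn, pEn, decide_eq_true_eq]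
  split_ifs <;> first | (exfalso; omega) | simp

theorem pvFillE_eq (xs : List Int) (st : List Int × List Int × List Int) :
    xs.foldl pvFillE st =
      (st.1 ++ xs.filter pOp, st.2.1 ++ xs.filter pOn, st.2.2 ++ xs.filter pEn) := by
  induction xs generalizing st with
  | nil => simp
  | cons x t ih =>
    simp only [List.foldl_cons, pvFillE_step, ih, List.filter_cons]
    split_ifs <;> simp

theorem pvScan_spec (x : Int) :
    ∀ (l : List Int) (temp : Int), l ≠ [] → (∀ y ∈ l, (x - y) % 2 = 0) →
      ((pvScan x temp l % 2 ≠ 0 ∨ pvScan x temp l < 1) ↔ ∀ y ∈ l, x ≤ y) := by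
  intro l
  induction l with
  | nil => intro temp h; exact absurd rfl h
  | cons h t ih =>
    intro temp _ hpar
    have hh : (x - h) % 2 = 0 := hpar h (by simp)
    by_cases hlt : x - h < 1
    · have hstep : pvScan x temp (h :: t) = pvScan x (x - h) t := by
        simp [pvScan, hlt]
      cases t with
      | nil =>
        rw [hstep]
        have hval : pvScan x (x - h) [] = x - h := rfl
        rw [hval]
        simp only [List.mem_singleton, forall_eq]
        omega
      | cons b u =>
        rw [hstep, ih (x - h) (by simp) (fun y hy => hpar y (List.mem_cons_of_mem _ hy))]
        constructor
        · intro hall y hy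
          rcases List.mem_cons.mp hy with rfl | hy'
          · omega
          · exact hall y hy'
        · intro hall y hy
          exact hall y (List.mem_cons_of_mem _ hy)
    · have hstep : pvScan x temp (h :: t) = x - h := by
        simp [pvScan, hlt, hh]
      rw [hstep]
      constructor
      · intro hc
        exfalso
        rcases hc with hc | hc <;> omega
      · intro hall
        exfalso
        have := hall h (by simp)
        omega

theorem pvLoop2E_spec (xs : List Int) :
    ∀ (rest : List Int), (∀ x ∈ rest, x ∈ xs) → ∀ temp,
      pvLoop2E (xs.filter pOp) (xs.filter pOn) (xs.filter pEn) temp rest =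
        rest.all (pvGood xs) := by
  intro rest
  induction rest with
  | nil => intro _ _; rfl
  | cons x rest ih =>
    intro hsub temp
    have hx : x ∈ xs := hsub x (by simp)
    have ihr := ih (fun z hz => hsub z (List.mem_cons_of_mem _ hz))
    have h2 := Int.emod_two_eq x
    simp only [pvLoop2E, pvMod2, List.all_cons]
    rcases h2 with hev | hod
    · by_cases hlt : x < 1
      · -- even, nonpositive: the 'en' branch
        rw [if_pos (Or.inr hlt), if_neg (by omega : ¬(x % 2 = 1 ∧ x > 0)),
            if_pos (⟨hev, hlt⟩ : x % 2 = 0 ∧ x < 1)]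
        have hxm : x ∈ xs.filter pEn := by
          simp only [List.mem_filter, pEn, decide_eq_true_eq]
          exact ⟨hx, hev, hlt⟩
        have hne : xs.filter pEn ≠ [] := by
          intro hnil; rw [hnil] at hxm; simp at hxm
        have hpar : ∀ y ∈ xs.filter pEn, (x - y) % 2 = 0 := by
          intro y hy
          have := (List.mem_filter.mp hy).2
          simp only [pEn, decide_eq_true_eq] at this
          omega
        have hscan := pvScan_spec x (xs.filter pEn) temp hne hpar
        have hgood : pvGood xs x = ((xs.filter pEn).any (fun y => decide (y < x))) := by
          simp only [pvGood, if_neg (by omega : ¬ x % 2 ≠ 0), if_pos hlt]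
          rcases h : (xs.filter pEn).any (fun y => decide (y < x)) with _ | _
          · simp only [List.any_eq_false, decide_eq_true_eq] at h ⊢
            intro y hy hc
            refine h y ?_ (by omega)
            simp only [List.mem_filter, pEn, decide_eq_true_eq]
            exact ⟨hy, by omega⟩
          · simp only [List.any_eq_true, decide_eq_true_eq] at h ⊢
            obtain ⟨y, hy, hyx⟩ := h
            have := (List.mem_filter.mp hy).2
            simp only [pEn, decide_eq_true_eq] at this
            exact ⟨y, (List.mem_filter.mp hy).1, by omega⟩
        by_cases hfail : ∀ y ∈ xs.filter pEn, x ≤ y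
        · rw [if_pos (hscan.mpr hfail)]
          have : ((xs.filter pEn).any (fun y => decide (y < x))) = false := by
            simp only [List.any_eq_false, decide_eq_true_eq]
            intro y hy
            have := hfail y hy; omega
          rw [hgood, this]; simp
        · rw [if_neg (fun hc => hfail (hscan.mp hc)), ihr]
          have : ((xs.filter pEn).any (fun y => decide (y < x))) = true := by
            push_neg at hfail
            obtain ⟨y, hy, hyx⟩ := hfail
            simp only [List.any_eq_true, decide_eq_true_eq]
            exact ⟨y, hy, by omega⟩
          rw [hgood, this]; simp
      · -- even, positive: not considered at all
        rw [if_neg (by omega : ¬(x % 2 ≠ 0 ∨ x < 1)), ihr]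
        have : pvGood xs x = true := by
          simp only [pvGood, if_neg (by omega : ¬ x % 2 ≠ 0), if_neg hlt]
        rw [this]; simp
    · -- odd
      rw [if_pos (Or.inl (by omega))]
      by_cases hpos : x > 0
      · -- odd, positive: scans op ++ on, i.e. all odd elements
        rw [if_pos (⟨hod, hpos⟩ : x % 2 = 1 ∧ x > 0)]
        have hxm : x ∈ xs.filter pOp := by
          simp only [List.mem_filter, pOp, decide_eq_true_eq]
          exact ⟨hx, hod, hpos⟩
        have hne : xs.filter pOp ++ xs.filter pOn ≠ [] := by
          intro hnil
          have hmem : x ∈ xs.filter pOp ++ xs.filter pOn := List.mem_append_left _ hxm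
          rw [hnil] at hmem; simp at hmem
        have hmem_iff : ∀ y, y ∈ xs.filter pOp ++ xs.filter pOn ↔ (y ∈ xs ∧ y % 2 = 1) := by
          intro y
          simp only [List.mem_append, List.mem_filter, pOp, pOn, decide_eq_true_eq]
          constructor
          · rintro (⟨hy, h1, _⟩ | ⟨hy, h1, _⟩) <;> exact ⟨hy, h1⟩
          · rintro ⟨hy, h1⟩
            by_cases hyp : y > 0
            · exact Or.inl ⟨hy, h1, hyp⟩
            · exact Or.inr ⟨hy, h1, by omega⟩
        have hpar : ∀ y ∈ xs.filter pOp ++ xs.filter pOn, (x - y) % 2 = 0 := by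
          intro y hy
          have := (hmem_iff y).mp hy
          omega
        have hscan := pvScan_spec x (xs.filter pOp ++ xs.filter pOn) temp hne hpar
        have hgood : pvGood xs x =
            ((xs.filter pOp ++ xs.filter pOn).any (fun y => decide (y < x))) := by
          simp only [pvGood, if_pos (by omega : x % 2 ≠ 0)]
          rcases h : (xs.filter pOp ++ xs.filter pOn).any (fun y => decide (y < x)) with _ | _
          · simp only [List.any_eq_false, decide_eq_true_eq] at h ⊢
            intro y hy hc
            exact h y ((hmem_iff y).mpr ⟨hy, by omega⟩) (by omega)
          · simp only [List.any_eq_true, decide_eq_true_eq] at h ⊢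
            obtain ⟨y, hy, hyx⟩ := h
            have := (hmem_iff y).mp hy
            exact ⟨y, this.1, by omega⟩
        by_cases hfail : ∀ y ∈ xs.filter pOp ++ xs.filter pOn, x ≤ y
        · rw [if_pos (hscan.mpr hfail)]
          have : ((xs.filter pOp ++ xs.filter pOn).any (fun y => decide (y < x))) = false := by
            simp only [List.any_eq_false, decide_eq_true_eq]
            intro y hy
            have := hfail y hy; omega
          rw [hgood, this]; simp
        · rw [if_neg (fun hc => hfail (hscan.mp hc)), ihr]
          have : ((xs.filter pOp ++ xs.filter pOn).any (fun y => decide (y < x))) = true := by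
            push_neg at hfail
            obtain ⟨y, hy, hyx⟩ := hfail
            simp only [List.any_eq_true, decide_eq_true_eq]
            exact ⟨y, hy, by omega⟩
          rw [hgood, this]; simp
      · -- odd, nonpositive: the 'on' branch
        rw [if_neg (by omega : ¬(x % 2 = 1 ∧ x > 0)), if_neg (by omega : ¬(x % 2 = 0 ∧ x < 1))]
        have hxm : x ∈ xs.filter pOn := by
          simp only [List.mem_filter, pOn, decide_eq_true_eq]
          exact ⟨hx, hod, by omega⟩
        have hne : xs.filter pOn ≠ [] := by
          intro hnil; rw [hnil] at hxm; simp at hxm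
        have hpar : ∀ y ∈ xs.filter pOn, (x - y) % 2 = 0 := by
          intro y hy
          have := (List.mem_filter.mp hy).2
          simp only [pOn, decide_eq_true_eq] at this
          omega
        have hscan := pvScan_spec x (xs.filter pOn) temp hne hpar
        have hgood : pvGood xs x = ((xs.filter pOn).any (fun y => decide (y < x))) := by
          simp only [pvGood, if_pos (by omega : x % 2 ≠ 0)]
          rcases h : (xs.filter pOn).any (fun y => decide (y < x)) with _ | _
          · simp only [List.any_eq_false, decide_eq_true_eq] at h ⊢
            intro y hy hc
            refine h y ?_ (by omega)
            simp only [List.mem_filter, pOn, decide_eq_true_eq]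
            exact ⟨hy, by omega⟩
          · simp only [List.any_eq_true, decide_eq_true_eq] at h ⊢
            obtain ⟨y, hy, hyx⟩ := h
            have := (List.mem_filter.mp hy).2
            simp only [pOn, decide_eq_true_eq] at this
            exact ⟨y, (List.mem_filter.mp hy).1, by omega⟩
        by_cases hfail : ∀ y ∈ xs.filter pOn, x ≤ y
        · rw [if_pos (hscan.mpr hfail)]
          have : ((xs.filter pOn).any (fun y => decide (y < x))) = false := by
            simp only [List.any_eq_false, decide_eq_true_eq]
            intro y hy
            have := hfail y hy; omega
          rw [hgood, this]; simp
        · rw [if_neg (fun hc => hfail (hscan.mp hc)), ihr]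
          have : ((xs.filter pOn).any (fun y => decide (y < x))) = true := by
            push_neg at hfail
            obtain ⟨y, hy, hyx⟩ := hfail
            simp only [List.any_eq_true, decide_eq_true_eq]
            exact ⟨y, hy, by omega⟩
          rw [hgood, this]; simp

theorem pvCheck_point (xs : List Int) (x : Int) (hx : x ∈ xs) :
    pvCheck (PySem.List.min? (xs.filter fun z => decide (PySem.Int.mod z 2 ≠ 0)) (fun y => y))
            (PySem.List.min? (xs.filter fun z => decide (PySem.Int.mod z 2 ≠ 0 ∧ z ≤ 0)) (fun y => y))
            (PySem.List.min? (xs.filter fun z => decide (PySem.Int.mod z 2 = 0 ∧ z < 1)) (fun y => y)) x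
      = pvGood xs x := by
  have h2 := Int.emod_two_eq x
  rcases h2 with hev | hod
  · by_cases hlt : x < 1
    · -- even nonpositive: compare with the minimum of the nonpositive evens
      have hxm : x ∈ xs.filter fun z => decide (PySem.Int.mod z 2 = 0 ∧ z < 1) := by
        simp only [List.mem_filter, pvMod2, decide_eq_true_eq]
        exact ⟨hx, hev, hlt⟩
      obtain ⟨m, hm⟩ : ∃ m, PySem.List.min?
          (xs.filter fun z => decide (PySem.Int.mod z 2 = 0 ∧ z < 1)) (fun y => y) = some m := by
        cases h : PySem.List.min? (xs.filter fun z => decide (PySem.Int.mod z 2 = 0 ∧ z < 1)) (fun y => y) with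
        | none =>
          rw [PySem.List.min?_eq_none_iff] at h
          rw [h] at hxm; simp at hxm
        | some m => exact ⟨m, rfl⟩
      have hmmin := PySem.List.min?_isMin hm
      have hmmem := PySem.List.min?_mem hm
      have hmprop := (List.mem_filter.mp hmmem).2
      simp only [pvMod2, decide_eq_true_eq] at hmprop
      simp only [pvMod2] at hm hmmin hxm
      simp only [pvCheck, pvGood, pvMod2, if_neg (by omega : ¬ x % 2 ≠ 0), if_pos hlt, hm]
      by_cases hmx : m < x
      · rw [decide_eq_true hmx]
        symm; rw [List.any_eq_true]
        exact ⟨m, (List.mem_filter.mp hmmem).1, by simp only [decide_eq_true_eq]; exact ⟨hmprop.1, hmx⟩⟩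
      · rw [decide_eq_false hmx]
        symm; rw [List.any_eq_false]
        intro y hy
        simp only [decide_eq_true_eq]
        rintro ⟨hye, hyx⟩
        have hyf : y ∈ xs.filter fun z => decide (z % 2 = 0 ∧ z < 1) := by
          simp only [List.mem_filter, decide_eq_true_eq]
          exact ⟨hy, hye, by omega⟩
        have := hmmin y hyf
        simp only [] at this
        omega
    · -- even positive: both sides are trivially true
      simp only [pvCheck, pvGood, pvMod2, if_neg (by omega : ¬ x % 2 ≠ 0), if_neg hlt]
  · by_cases hpos : x > 0
    · -- odd positive: compare with the minimum of all odd elements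
      have hxm : x ∈ xs.filter fun z => decide (PySem.Int.mod z 2 ≠ 0) := by
        simp only [List.mem_filter, pvMod2, decide_eq_true_eq]
        exact ⟨hx, by omega⟩
      obtain ⟨m, hm⟩ : ∃ m, PySem.List.min?
          (xs.filter fun z => decide (PySem.Int.mod z 2 ≠ 0)) (fun y => y) = some m := by
        cases h : PySem.List.min? (xs.filter fun z => decide (PySem.Int.mod z 2 ≠ 0)) (fun y => y) with
        | none =>
          rw [PySem.List.min?_eq_none_iff] at h
          rw [h] at hxm; simp at hxm
        | some m => exact ⟨m, rfl⟩
      have hmmin := PySem.List.min?_isMin hm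
      have hmmem := PySem.List.min?_mem hm
      have hmprop := (List.mem_filter.mp hmmem).2
      simp only [pvMod2, decide_eq_true_eq] at hmprop
      simp only [pvMod2] at hm hmmin hxm
      simp only [pvCheck, pvGood, pvMod2, if_pos (by omega : x % 2 ≠ 0), if_pos hpos, hm]
      by_cases hmx : m < x
      · rw [decide_eq_true hmx]
        symm; rw [List.any_eq_true]
        exact ⟨m, (List.mem_filter.mp hmmem).1, by simp only [decide_eq_true_eq]; exact ⟨hmprop, hmx⟩⟩
      · rw [decide_eq_false hmx]
        symm; rw [List.any_eq_false]
        intro y hy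
        simp only [decide_eq_true_eq]
        rintro ⟨hye, hyx⟩
        have hyf : y ∈ xs.filter fun z => decide (z % 2 ≠ 0) := by
          simp only [List.mem_filter, decide_eq_true_eq]
          exact ⟨hy, hye⟩
        have := hmmin y hyf
        simp only [] at this
        omega
    · -- odd nonpositive: compare with the minimum of the nonpositive odds
      have hxm : x ∈ xs.filter fun z => decide (PySem.Int.mod z 2 ≠ 0 ∧ z ≤ 0) := by
        simp only [List.mem_filter, pvMod2, decide_eq_true_eq]
        exact ⟨hx, by omega, by omega⟩
      obtain ⟨m, hm⟩ : ∃ m, PySem.List.min?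
          (xs.filter fun z => decide (PySem.Int.mod z 2 ≠ 0 ∧ z ≤ 0)) (fun y => y) = some m := by
        cases h : PySem.List.min? (xs.filter fun z => decide (PySem.Int.mod z 2 ≠ 0 ∧ z ≤ 0)) (fun y => y) with
        | none =>
          rw [PySem.List.min?_eq_none_iff] at h
          rw [h] at hxm; simp at hxm
        | some m => exact ⟨m, rfl⟩
      have hmmin := PySem.List.min?_isMin hm
      have hmmem := PySem.List.min?_mem hm
      have hmprop := (List.mem_filter.mp hmmem).2
      simp only [pvMod2, decide_eq_true_eq] at hmprop
      simp only [pvMod2] at hm hmmin hxm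
      simp only [pvCheck, pvGood, pvMod2, if_pos (by omega : x % 2 ≠ 0), if_neg hpos, hm]
      by_cases hmx : m < x
      · rw [decide_eq_true hmx]
        symm; rw [List.any_eq_true]
        exact ⟨m, (List.mem_filter.mp hmmem).1, by simp only [decide_eq_true_eq]; exact ⟨hmprop.1, hmx⟩⟩
      · rw [decide_eq_false hmx]
        symm; rw [List.any_eq_false]
        intro y hy
        simp only [decide_eq_true_eq]
        rintro ⟨hye, hyx⟩
        have hyf : y ∈ xs.filter fun z => decide (z % 2 ≠ 0 ∧ z ≤ 0) := by
          simp only [List.mem_filter, decide_eq_true_eq]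
          exact ⟨hy, hye, by omega⟩
        have := hmmin y hyf
        simp only [] at this
        omega

theorem pvMap_get_range (a : List Int) (k : Nat) (hk : k ≤ a.length) :
    (List.range k).map (fun i : Nat => PySem.List.pyGetD a (i : Int) 0) = a.take k := by
  induction k with
  | zero => simp
  | succ m ih =>
    have hm : m < a.length := by omega
    rw [List.range_succ, List.map_append, ih (by omega), List.take_add_one]
    simp [PySem.List.pyGetD_natCast, List.getD_eq_getElem?_getD, hm]

theorem pvIdx_map (a : List Int) (n : Int) (hn : n ≤ (a.length : Int)) :
    (PySem.List.pyRange 0 n 1).map (fun i => PySem.List.pyGetD a i 0) = a.take n.toNat := by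
  rw [PySem.List.pyRange_one, List.map_map]
  simp only [Function.comp_def, zero_add, Int.sub_zero]
  exact pvMap_get_range a n.toNat (by omega)

theorem pvAll_congr {l : List Int} {p q : Int → Bool} (h : ∀ x ∈ l, p x = q x) :
    l.all p = l.all q := by
  induction l with
  | nil => rfl
  | cons x t ih =>
    simp only [List.all_cons, h x (by simp), ih (fun y hy => h y (by simp [hy]))]

-- ===== VERDICT (by name: the statement is the Claim_ definition above) =====
theorem build_even_spec : Claim_equal_build_even := by
  intro a n _ hpre
  unfold Spec_build_even
  have hxs : (if n > 0 then PySem.List.slice a none (some n) else []) = a.take n.toNat := by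
    by_cases hn : n > 0
    · rw [if_pos hn]
      exact PySem.List.slice_to a (le_of_lt hn)
    · rw [if_neg hn]
      have : n.toNat = 0 := by omega
      rw [this, List.take_zero]
  simp only [build_even, build_even_alt]
  rw [pvFold_fill_map, pvFillE_eq, pvLoop2_map, pvIdx_map a n hpre, hxs]
  simp only [List.nil_append]
  rw [pvLoop2E_spec (a.take n.toNat) (a.take n.toNat) (fun _ h => h) 0]
  exact (pvAll_congr (pvCheck_point (a.take n.toNat))).symm
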